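-- pv_equiv track=rewrite | github.com/Amastercuber/dsa | cmpsc132/HW1.py | has_hoagie
-- ===== SOURCE A (Python) =====
-- def has_hoagie(num):
--     """
--         >>> has_hoagie(737)
--         True
--         >>> has_hoagie(35)
--         False
--         >>> has_hoagie(-6060)
--         True
--         >>> has_hoagie(-111)
--         True
--         >>> has_hoagie(6945)
--         False
--     """
--     #- YOUR CODE STARTS HERE
--     num = abs(num)
--     while(num//100 > 0):                                # repeat until num is 2 digits this also takes care of nums under 3 digits
--         section = num % 1000                            # save the last 3 digits
--         if(section // 100 == section % 10):             # check if the hundereds = ones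
--             return True
--         num //= 10                                      # remove last digit
--     return False
-- ===== SOURCE B (Python) =====
-- def _deinterleave(chars):
--     """Split a list into (even-position elements, odd-position elements)."""
--     if not chars:
--         return [], []
--     evens_rest, odds_rest = _deinterleave(chars[1:])
--     return [chars[0]] + odds_rest, evens_rest
--
--
-- def _has_adjacent_duplicate(chars):
--     return any(a == b for a, b in zip(chars, chars[1:]))
--
--
-- def has_hoagie(num):
--     evens, odds = _deinterleave(list(str(abs(num))))
--     return _has_adjacent_duplicate(evens) or _has_adjacent_duplicate(odds)
-- ===== Notes on version B (the rewrite author's own statement) =====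
-- stated objective: alternative
-- what changed: B recursively deinterleaves the decimal digit string of abs(num) into the even-position and odd-position subsequences and checks each for an adjacent duplicate, instead of A's while-loop that repeatedly compares the hundreds and ones digits of the trailing three digits while repeatedly floor-dividing by ten.
import Mathlib
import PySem

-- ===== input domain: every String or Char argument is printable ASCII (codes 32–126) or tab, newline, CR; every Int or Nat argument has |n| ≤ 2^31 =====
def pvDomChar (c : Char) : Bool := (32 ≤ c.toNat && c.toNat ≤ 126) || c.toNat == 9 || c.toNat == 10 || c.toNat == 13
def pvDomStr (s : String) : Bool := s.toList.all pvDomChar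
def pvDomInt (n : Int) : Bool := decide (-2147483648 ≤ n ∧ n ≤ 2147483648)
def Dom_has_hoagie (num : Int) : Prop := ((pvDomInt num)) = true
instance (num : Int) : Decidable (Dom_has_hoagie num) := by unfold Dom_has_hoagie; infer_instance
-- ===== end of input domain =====

-- B deinterleaves the digit string of abs(num) into even/odd-position subsequences and
-- looks for an adjacent duplicate in either, replacing A's modulus/floor-division arithmetic loop
-- (objective: alternative; same cost).

-- ===== PORT A =====
-- A first sets num = abs(num); from then on num is a nonnegative integer, so Python's
-- // and % coincide with Nat division/mod: the loop is ported as a recursion on Nat.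
def hoagieLoopA (n : Nat) : Bool :=
  if n / 100 > 0 then                              -- while(num//100 > 0)
    if (n % 1000) / 100 == n % 10 then true        -- section = num % 1000; hundreds == ones
    else hoagieLoopA (n / 10)                      -- num //= 10
  else false
termination_by n
decreasing_by exact Nat.div_lt_self (by omega) (by omega)

def has_hoagie (num : Int) : Bool := hoagieLoopA num.natAbs   -- num = abs(num)

-- ===== PORT B =====
-- _deinterleave: ([], []) on empty, else prepend the head to the odds of the tail.
def pvDeinter : List Char → List Char × List Char
  | [] => ([], [])
  | a :: t => (a :: (pvDeinter t).2, (pvDeinter t).1)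

-- _has_adjacent_duplicate: any(a == b for a, b in zip(chars, chars[1:]))
def pvHasAdj (cs : List Char) : Bool := (cs.zip cs.tail).any (fun p => p.1 == p.2)

def has_hoagie_alt (num : Int) : Bool :=
  let cs := (PySem.Int.toStr ((num.natAbs : Int))).toList   -- list(str(abs(num)))
  pvHasAdj (pvDeinter cs).1 || pvHasAdj (pvDeinter cs).2

-- ===== PRECONDITION & SPEC =====
def Spec_has_hoagie (num : Int) (out : Bool) : Prop := out = has_hoagie_alt num
instance (num : Int) (out : Bool) : Decidable (Spec_has_hoagie num out) := by unfold Spec_has_hoagie; infer_instance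

-- ===== CLAIM =====
def Claim_equal_has_hoagie : Prop := ∀ (num : Int), Dom_has_hoagie num → Spec_has_hoagie num (has_hoagie num)

-- ===== LEMMAS AND PROOFS =====

-- Proof-side intermediate: the index scan "∃ i, cs[i] == cs[i+2]".
def pvScan (cs : List Char) : Bool :=
  (List.range (cs.length - 2)).any (fun i => cs[i]? == cs[i + 2]?)

-- toDigitsCore is independent of the accumulator (it only appends to it).
theorem pvTdcAcc (b : Nat) : ∀ (f n : Nat) (l : List Char),
    Nat.toDigitsCore b f n l = Nat.toDigitsCore b f n [] ++ l := by
  intro f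
  induction f with
  | zero => intro n l; simp [Nat.toDigitsCore]
  | succ f ih =>
      intro n l
      simp only [Nat.toDigitsCore]
      by_cases h : n / b = 0
      · simp [h]
      · simp only [h, if_false]
        rw [ih (n / b) (Nat.digitChar (n % b) :: l), ih (n / b) [Nat.digitChar (n % b)]]
        simp

-- toDigitsCore is independent of the fuel once the fuel exceeds n.
theorem pvTdcFuel (b : Nat) (hb : 1 < b) : ∀ (f n : Nat) (l : List Char), n < f →
    Nat.toDigitsCore b f n l = Nat.toDigitsCore b (n + 1) n l := by
  intro f
  induction f using Nat.strong_induction_on with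
  | _ f ih =>
    intro n l hn
    obtain ⟨f, rfl⟩ : ∃ f', f = f' + 1 := ⟨f - 1, by omega⟩
    simp only [Nat.toDigitsCore]
    by_cases h : n / b = 0
    · simp [h]
    · simp only [h, if_false]
      have hn0 : 0 < n := Nat.pos_of_ne_zero (fun e => h (by simp [e]))
      have hnb : n / b < n := Nat.div_lt_self hn0 hb
      have hle : n ≤ f := Nat.lt_succ_iff.mp hn
      rw [ih f (Nat.lt_succ_self f) (n / b) _ (Nat.lt_of_lt_of_le hnb hle),
          ih n hn (n / b) _ hnb]

-- Base case of str(): one digit.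
theorem pvToDigitsBase (n : Nat) (h : n < 10) :
    Nat.toDigits 10 n = [Nat.digitChar n] := by
  simp [Nat.toDigits, Nat.toDigitsCore, Nat.div_eq_of_lt h, Nat.mod_eq_of_lt h]

-- Recursion of str(): the last digit is appended.
theorem pvToDigitsRec (n : Nat) (h : 10 ≤ n) :
    Nat.toDigits 10 n = Nat.toDigits 10 (n / 10) ++ [Nat.digitChar (n % 10)] := by
  have h0 : n / 10 ≠ 0 := by omega
  conv_lhs => rw [Nat.toDigits]
  show Nat.toDigitsCore 10 (n + 1) n [] = _
  rw [Nat.toDigitsCore]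
  simp only [h0, if_false]
  rw [pvTdcAcc, pvTdcFuel 10 (by omega) n (n / 10) []
        (Nat.div_lt_self (by omega) (by omega))]
  rfl

theorem pvToDigitsLen2 (n : Nat) (h : 10 ≤ n) : 2 ≤ (Nat.toDigits 10 n).length := by
  rw [pvToDigitsRec n h]
  rcases Nat.lt_or_ge (n / 10) 10 with h' | h'
  · rw [pvToDigitsBase _ h']; simp
  · rw [pvToDigitsRec _ h']; simp

-- The last character of str(n) is the units digit.
theorem pvToDigitsLast (n : Nat) :
    (Nat.toDigits 10 n)[(Nat.toDigits 10 n).length - 1]? = some (Nat.digitChar (n % 10)) := by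
  rcases Nat.lt_or_ge n 10 with h | h
  · rw [pvToDigitsBase n h]; simp [Nat.mod_eq_of_lt h]
  · rw [pvToDigitsRec n h]; simp

theorem pvDigitCharInj (a b : Nat) (ha : a < 10) (hb : b < 10) :
    ((Nat.digitChar a == Nat.digitChar b) = (a == b)) := by
  interval_cases a <;> interval_cases b <;> decide

-- The index scan equals A's right-to-left arithmetic loop.
theorem pvScanLoop (n : Nat) : pvScan (Nat.toDigits 10 n) = hoagieLoopA n := by
  induction n using Nat.strong_induction_on with
  | _ n ih =>
    rcases Nat.lt_or_ge n 100 with h100 | h100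
    · have hlen : (Nat.toDigits 10 n).length ≤ 2 := by
        rcases Nat.lt_or_ge n 10 with h | h
        · rw [pvToDigitsBase n h]; simp
        · rw [pvToDigitsRec n h, pvToDigitsBase (n / 10) (by omega)]; simp
      rw [hoagieLoopA]
      have : n / 100 = 0 := by omega
      simp [this, pvScan, Nat.sub_eq_zero_of_le hlen]
    · have h10 : 10 ≤ n := by omega
      have h10' : 10 ≤ n / 10 := by omega
      set cs' := Nat.toDigits 10 (n / 10) with hcs'
      have hrec : Nat.toDigits 10 n = cs' ++ [Nat.digitChar (n % 10)] := pvToDigitsRec n h10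
      have hL : 2 ≤ cs'.length := pvToDigitsLen2 _ h10'
      unfold pvScan
      rw [hrec]
      have hlen : (cs' ++ [Nat.digitChar (n % 10)]).length - 2 = (cs'.length - 2) + 1 := by
        simp; omega
      rw [hlen, List.range_succ, List.any_append]
      have hold : ((List.range (cs'.length - 2)).any
            (fun i => (cs' ++ [Nat.digitChar (n % 10)])[i]? == (cs' ++ [Nat.digitChar (n % 10)])[i + 2]?))
          = ((List.range (cs'.length - 2)).any (fun i => cs'[i]? == cs'[i + 2]?)) := by
        rw [Bool.eq_iff_iff, List.any_eq_true, List.any_eq_true]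
        constructor
        · rintro ⟨i, hi, hp⟩
          refine ⟨i, hi, ?_⟩
          rw [List.mem_range] at hi
          rwa [List.getElem?_append_left (by omega), List.getElem?_append_left (by omega)] at hp
        · rintro ⟨i, hi, hp⟩
          refine ⟨i, hi, ?_⟩
          rw [List.mem_range] at hi
          rwa [List.getElem?_append_left (by omega), List.getElem?_append_left (by omega)]
      have hnew : ((cs' ++ [Nat.digitChar (n % 10)])[cs'.length - 2]? ==
            (cs' ++ [Nat.digitChar (n % 10)])[cs'.length - 2 + 2]?)
          = ((n % 1000) / 100 == n % 10) := by
        have e2 : cs'.length - 2 + 2 = cs'.length := by omega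
        rw [List.getElem?_append_left (by omega), e2, List.getElem?_append_right (by omega)]
        have hmid : cs'[cs'.length - 2]? = some (Nat.digitChar ((n / 100) % 10)) := by
          have hrec' : cs' = Nat.toDigits 10 (n / 100) ++ [Nat.digitChar (n / 10 % 10)] := by
            rw [hcs', pvToDigitsRec (n / 10) h10', Nat.div_div_eq_div_mul]
          rw [hrec']
          have hl : (Nat.toDigits 10 (n / 100) ++ [Nat.digitChar (n / 10 % 10)]).length - 2
              = (Nat.toDigits 10 (n / 100)).length - 1 := by simp
          have hlenpos : 1 ≤ (Nat.toDigits 10 (n / 100)).length := by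
            rcases Nat.lt_or_ge (n / 100) 10 with h' | h'
            · rw [pvToDigitsBase _ h']; simp
            · rw [pvToDigitsRec _ h']; simp
          rw [hl, List.getElem?_append_left (by omega), pvToDigitsLast]
        rw [hmid]
        simp only [Nat.sub_self, List.getElem?_cons_zero, Option.some_beq_some]
        rw [pvDigitCharInj _ _ (by omega) (by omega)]
        have : (n % 1000) / 100 = (n / 100) % 10 := by omega
        rw [this]
      simp only [List.any_cons, List.any_nil, Bool.or_false, hold, hnew]
      rw [hoagieLoopA]
      have hpos : n / 100 > 0 := by omega
      simp only [hpos, if_true]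
      rw [hcs']
      by_cases hc : (n % 1000) / 100 == n % 10
      · simp [hc]
      · have := ih (n / 10) (Nat.div_lt_self (by omega) (by omega))
        unfold pvScan at this
        simp [hc, this, Bool.or_comm]

-- Unfolding lemmas for the adjacent-duplicate check.
theorem pvHasAdj_cons2 (a b : Char) (t : List Char) :
    pvHasAdj (a :: b :: t) = ((a == b) || pvHasAdj (b :: t)) := by
  simp [pvHasAdj]

-- The index scan of a cons peels the first window (when at least two remain behind it).
theorem pvScan_cons (a : Char) (t : List Char) (h : 2 ≤ t.length) :
    pvScan (a :: t) = ((some a == t[1]?) || pvScan t) := by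
  unfold pvScan
  rw [Bool.eq_iff_iff]
  simp only [List.any_eq_true, List.mem_range, Bool.or_eq_true, List.length_cons]
  constructor
  · rintro ⟨i, hi, hp⟩
    match i with
    | 0 => exact Or.inl (by simpa using hp)
    | j + 1 =>
        refine Or.inr ⟨j, by omega, ?_⟩
        simpa using hp
  · rintro (hp | ⟨i, hi, hp⟩)
    · exact ⟨0, by omega, by simpa using hp⟩
    · exact ⟨i + 1, by omega, by simpa using hp⟩

-- Main parity lemma: adjacent duplicates in the deinterleaved halves ⟺ the index scan.
theorem pvParity : ∀ (cs : List Char),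
    (pvHasAdj (pvDeinter cs).1 || pvHasAdj (pvDeinter cs).2) = pvScan cs
  | [] => by decide
  | [a] => by simp [pvDeinter, pvHasAdj, pvScan]
  | [a, b] => by simp [pvDeinter, pvHasAdj, pvScan]
  | a :: b :: c :: t => by
      have hIH := pvParity (b :: c :: t)
      simp only [pvDeinter] at hIH ⊢
      rw [pvHasAdj_cons2]
      rw [pvScan_cons a (b :: c :: t) (by simp)]
      rw [← hIH]
      simp only [List.getElem?_cons_succ, List.getElem?_cons_zero, Option.some_beq_some]
      cases a == c <;> cases pvHasAdj (c :: (pvDeinter t).2) <;>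
        cases pvHasAdj (b :: (pvDeinter t).1) <;> simp
termination_by cs => cs.length

-- ===== VERDICT =====
theorem has_hoagie_spec : Claim_equal_has_hoagie := by
  intro num _
  unfold Spec_has_hoagie has_hoagie has_hoagie_alt
  have hcast : (PySem.Int.toStr ((num.natAbs : Int))).toList = Nat.toDigits 10 num.natAbs := by
    rw [PySem.Int.toList_toStr]
    have h0 : ¬ ((num.natAbs : Int) < 0) := by omega
    unfold PySem.Int.toChars
    rw [if_neg h0, Int.toNat_natCast]
  simp only [hcast]
  rw [pvParity, pvScanLoop]
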